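-- pv_equiv track=rewrite | github.com/Alimullah1573/All_Site_Problem_Solving | 2.Codeforces/0__A/A. Find Minimum Operations.py | find_min_oper
-- ===== SOURCE A (Python) =====
-- def find_min_oper(n, k):
--     if k == 1:
--         return n
--     result = 0
--     while n:
--         result += n % k
--         n //= k
--     return result
-- ===== SOURCE B (Python) =====
-- def find_min_oper(n, k):
--     if k == 1:
--         return n
--     if n == 0:
--         return 0
--     q, r = divmod(n, k)
--     return r + find_min_oper(q, k)
-- ===== Notes on version B (the rewrite author's own statement) =====
-- stated objective: alternative
-- what changed: B replaces A's while-loop with a destructuring accumulator-free recursion: each call takes one divmod step and builds the digit sum on return (r + recurse(q)) instead of mutating n and a running total in place.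
import Mathlib
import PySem

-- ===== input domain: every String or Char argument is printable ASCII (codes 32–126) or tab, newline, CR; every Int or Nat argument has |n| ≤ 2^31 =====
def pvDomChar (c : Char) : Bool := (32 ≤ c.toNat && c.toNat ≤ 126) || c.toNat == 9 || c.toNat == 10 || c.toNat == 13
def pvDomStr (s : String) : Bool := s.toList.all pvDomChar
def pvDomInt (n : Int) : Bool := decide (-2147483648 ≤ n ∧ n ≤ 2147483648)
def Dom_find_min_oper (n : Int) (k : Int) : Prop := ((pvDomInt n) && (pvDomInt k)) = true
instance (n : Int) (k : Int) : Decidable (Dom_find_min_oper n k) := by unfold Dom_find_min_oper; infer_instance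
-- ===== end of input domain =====

-- B computes the base-k digit sum by an accumulator-free recursion over divmod steps
-- (result built on return) instead of A's in-place while-loop; same asymptotic cost.


-- ===== PORT A =====
-- A's while-loop: accumulate n % k, then n //= k; fuel 2*|n|+2 suffices on Pre_.
def loopA : Nat → Int → Int → Int → Int
  | 0, _, _, acc => acc
  | f + 1, n, k, acc =>
      if n = 0 then acc
      else loopA f (PySem.Int.floordiv n k) k (acc + PySem.Int.mod n k)

def find_min_oper (n : Int) (k : Int) : Int :=
  if k = 1 then n else loopA (2 * n.natAbs + 2) n k 0

-- ===== PORT B =====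
-- B's recursion: one divmod step per call, digit sum assembled on return (r + rec q);
-- fuel 2*|n|+2 suffices on Pre_; the 'none' divmod branch (k = 0) is outside Pre_.
def sumDigitsRec : Nat → Int → Int → Int
  | 0, _, _ => 0
  | fuel + 1, m, base =>
      if m = 0 then 0
      else
        match PySem.Int.divmod? m base with
        | some (q, r) => r + sumDigitsRec fuel q base
        | none => 0

def find_min_oper_alt (n : Int) (k : Int) : Int :=
  if k = 1 then n else sumDigitsRec (2 * n.natAbs + 2) n k

-- ===== PRECONDITION & SPEC =====
-- Pre_ excludes exactly the inputs where A does not return: k = 0 with n ≠ 0 (ZeroDivisionError),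
-- and k = -1 or (k ≥ 2 with n < 0), where A's while-loop never reaches 0 (it diverges).
def Pre_find_min_oper (n : Int) (k : Int) : Prop :=
  k = 1 ∨ k ≤ -2 ∨ (2 ≤ k ∧ 0 ≤ n) ∨ n = 0
instance (n : Int) (k : Int) : Decidable (Pre_find_min_oper n k) := by
  unfold Pre_find_min_oper; infer_instance

def pvWitness_find_min_oper : Int × Int := (10, 3)

def Spec_find_min_oper (n : Int) (k : Int) (out : Int) : Prop := out = find_min_oper_alt n k
instance (n : Int) (k : Int) (out : Int) : Decidable (Spec_find_min_oper n k out) := by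
  unfold Spec_find_min_oper; infer_instance

-- ===== CLAIM (what is proved, stated in full; the proofs are below) =====
def Claim_equal_find_min_oper : Prop :=
  ∀ (n : Int) (k : Int), Dom_find_min_oper n k → Pre_find_min_oper n k →
    Spec_find_min_oper n k (find_min_oper n k)

-- ===== LEMMAS AND PROOFS =====

lemma divmod?_of_ne (m k : Int) (hk : k ≠ 0) :
    PySem.Int.divmod? m k = some (PySem.Int.floordiv m k, PySem.Int.mod m k) := by
  simp [PySem.Int.divmod?, hk,
    PySem.Int.floordiv, PySem.Int.mod]

-- Both versions walk the same quotient chain with the same fuel; as long as k ≠ 0,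
-- the loop's accumulator equals what the recursion adds on the way back.
lemma key : ∀ (f : Nat) (n k a : Int), k ≠ 0 →
    loopA f n k a = a + sumDigitsRec f n k := by
  intro f
  induction f with
  | zero => intro n k a _; simp [loopA, sumDigitsRec]
  | succ f ih =>
    intro n k a hk
    by_cases hn : n = 0
    · simp [loopA, sumDigitsRec, hn]
    · simp only [loopA, sumDigitsRec, if_neg hn, divmod?_of_ne n k hk]
      rw [ih _ _ _ hk]
      ring

-- ===== VERDICT (by name: the statement is the Claim_ definition above) =====
theorem find_min_oper_spec : Claim_equal_find_min_oper := by
  intro n k _ hpre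
  unfold Spec_find_min_oper find_min_oper find_min_oper_alt
  by_cases hk1 : k = 1
  · simp [hk1]
  · simp only [if_neg hk1]
    by_cases hk0 : k = 0
    · -- on Pre_ with k = 0 we must have n = 0: both sides are 0
      have hn : n = 0 := by
        rcases hpre with h | h | h | h <;> omega
      subst hn; subst hk0; decide
    · have h := key (2 * n.natAbs + 2) n k 0 hk0
      omega
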